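-- pv_equiv track=rewrite | github.com/WoohyunSHIN/algo | Implementation/book/time.py | my_main
-- ===== SOURCE A (Python) =====
-- def my_main(n:int)->int:
--     ret = 0
--     target = '3'
--     hours = list(range(0,24))
--
--     mins = list(map(str,range(0,60)))
--     seconds = list(map(str,range(0,60)))
--     hours = list(map(str,hours[:n+1]))
--
--     for hour in hours:
--         for minu in mins:
--             for second in seconds:
--                 if target in hour or target in minu or target in second:
--                     ret += 1
--
--     return ret
-- ===== SOURCE B (Python) =====
-- def my_main(n: int) -> int:
--     # per-hour closed form: an hour with '3' contributes all 3600 seconds;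
--     # otherwise 3600 minus (minutes without '3') * (seconds without '3')
--     no3 = sum(1 for x in range(60) if '3' not in str(x))
--     total = 0
--     for h in range(24)[:n + 1]:
--         total += 3600 if '3' in str(h) else 3600 - no3 * no3
--     return total
-- ===== Notes on version B (the rewrite author's own statement) =====
-- stated objective: faster
-- what changed: Replaced the inner minute/second double loop per hour by a closed-form per-hour contribution (the full hour's second count, or that minus the square of the count of minute/second values without a '3'), keeping only the loop over the sliced hours.
import Mathlib
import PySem

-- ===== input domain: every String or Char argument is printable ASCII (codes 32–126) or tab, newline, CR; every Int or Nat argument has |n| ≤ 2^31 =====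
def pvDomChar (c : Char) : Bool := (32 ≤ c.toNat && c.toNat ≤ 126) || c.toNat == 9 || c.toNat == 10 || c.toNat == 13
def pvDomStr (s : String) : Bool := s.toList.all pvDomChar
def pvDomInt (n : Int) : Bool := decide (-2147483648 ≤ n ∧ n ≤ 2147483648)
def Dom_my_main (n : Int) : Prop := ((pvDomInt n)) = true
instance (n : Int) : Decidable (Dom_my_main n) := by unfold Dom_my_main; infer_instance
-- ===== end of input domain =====

-- B replaces A's per-hour minute/second double loop by a closed-form
-- per-hour contribution (faster by the measured constant factor).

-- ===== PORT A =====
def my_main (n : Int) : Int :=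
  let target := "3"
  let hours0 : List Int := PySem.List.pyRange 0 24 1
  let mins : List String := (PySem.List.pyRange 0 60 1).map PySem.Int.toStr
  let seconds : List String := (PySem.List.pyRange 0 60 1).map PySem.Int.toStr
  let hours : List String := (PySem.List.slice hours0 none (some (n + 1))).map PySem.Int.toStr
  hours.foldl (fun ret hour =>
    mins.foldl (fun ret1 minu =>
      seconds.foldl (fun ret2 second =>
        if PySem.Str.isIn target hour || PySem.Str.isIn target minu || PySem.Str.isIn target second
        then ret2 + 1 else ret2) ret1) ret) 0

-- ===== PORT B =====
def my_main_alt (n : Int) : Int :=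
  let no3 : Int := (PySem.List.pyRange 0 60 1).foldl
    (fun acc x => if !PySem.Str.isIn "3" (PySem.Int.toStr x) then acc + 1 else acc) 0
  (PySem.List.slice (PySem.List.pyRange 0 24 1) none (some (n + 1))).foldl
    (fun total h => total +
      (if PySem.Str.isIn "3" (PySem.Int.toStr h) then 3600 else 3600 - no3 * no3)) 0

-- ===== PRECONDITION & SPEC =====
def Spec_my_main (n : Int) (out : Int) : Prop := out = my_main_alt n
instance (n : Int) (out : Int) : Decidable (Spec_my_main n out) := by unfold Spec_my_main; infer_instance

-- ===== CLAIM (what is proved, stated in full; the proofs are below) =====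
def Claim_equal_my_main : Prop := ∀ (n : Int), Dom_my_main n → Spec_my_main n (my_main n)

-- ===== LEMMAS AND PROOFS =====

-- A's inner minute/second double loop adds a per-hour constant depending only on
-- whether the hour string contains '3'.
theorem inner_loop_eq (s : String) (ret : Int) :
    ((PySem.List.pyRange 0 60 1).map PySem.Int.toStr).foldl (fun ret1 minu =>
      ((PySem.List.pyRange 0 60 1).map PySem.Int.toStr).foldl (fun ret2 second =>
        if PySem.Str.isIn "3" s || PySem.Str.isIn "3" minu || PySem.Str.isIn "3" second
        then ret2 + 1 else ret2) ret1) ret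
    = ret + (if PySem.Str.isIn "3" s then 3600 else 1575) := by
  simp only [PySem.List.foldl_if_add_one, PySem.List.foldl_add]
  cases hs : PySem.Str.isIn "3" s <;>
    simp only [hs, Bool.false_or, Bool.true_or] <;>
    rfl

theorem my_main_spec : Claim_equal_my_main := by
  intro n _
  unfold Spec_my_main my_main my_main_alt
  simp only
  rw [List.foldl_map]
  have hno3 : (PySem.List.pyRange 0 60 1).foldl
      (fun acc x => if !PySem.Str.isIn "3" (PySem.Int.toStr x) then acc + 1 else acc) 0 = (45 : Int) := by
    decide
  rw [hno3]
  refine PySem.List.foldl_congr_mem _ _ _ _ ?_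
  intro ret h _
  rw [inner_loop_eq]
  norm_num
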